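-- pv_equiv track=rewrite | github.com/wangwei0807/cv_crawler | cv_crawler/captcha/hackedfuns.py | jsc_verify_int
-- ===== SOURCE A (Python) =====
-- __CODE_ARRAY__ = []
--
-- def jsc_generate_code_array():
--     if len(__CODE_ARRAY__) > 0:
--         return __CODE_ARRAY__
--     for v in range(0, 256):
--         v7 = v
--         for w in range(0, 8):
--             if v7 & 0x80 != 0:
--                 v7 = (v7 << 1) ^ 7
--             else:
--                 v7 <<= 1
--         __CODE_ARRAY__.append(v7 & 0xff)
--     return __CODE_ARRAY__
--
-- def jsc_verify_int(arr):
--     if isinstance(arr, str):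
--         arr = jsc_str_ord(arr)
--     w = 0
--     b = jsc_generate_code_array()
--     for v in arr:
--         w = b[(w ^ v) & 0xFF]
--     return w
--
-- def jsc_str_ord(src):
--     a = []
--     for c in src:
--         a.append(ord(c))
--     return a
-- ===== SOURCE B (Python) =====
-- def jsc_verify_int(arr):
--     if isinstance(arr, str):
--         arr = [ord(c) for c in arr]
--     w = 0
--     for v in arr:
--         x = (w ^ v) & 0xFF
--         for _ in range(8):
--             x = ((x << 1) ^ 7) if (x & 0x80) else (x << 1)
--         w = x & 0xFF
--     return w
-- ===== Notes on version B (the rewrite author's own statement) =====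
-- stated objective: simpler
-- what changed: B drops the 256-entry precomputed lookup table and its memoizing global, recomputing the 8-round bit transform inline for each byte.
import Mathlib
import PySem

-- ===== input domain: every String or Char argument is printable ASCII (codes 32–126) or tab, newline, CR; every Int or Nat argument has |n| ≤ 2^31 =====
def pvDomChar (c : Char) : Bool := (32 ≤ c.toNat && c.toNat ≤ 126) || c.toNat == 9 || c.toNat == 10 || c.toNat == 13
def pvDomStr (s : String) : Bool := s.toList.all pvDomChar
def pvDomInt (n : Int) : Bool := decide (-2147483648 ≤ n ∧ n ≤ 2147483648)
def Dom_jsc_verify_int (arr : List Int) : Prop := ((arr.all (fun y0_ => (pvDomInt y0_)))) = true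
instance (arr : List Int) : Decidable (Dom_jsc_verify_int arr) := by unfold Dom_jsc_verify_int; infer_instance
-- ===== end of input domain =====

-- B drops the precomputed 256-entry lookup table (and its memoizing global), recomputing the
-- 8-round bit transform inline per byte; return values are identical.

-- ===== PORT A =====
-- jsc_generate_code_array(): builds the 256-entry table (memoization of the global is
-- state-invisible to the return value; the port is the generated table itself).
def jsc_code_array : List Int :=
  (PySem.List.pyRange 0 256 1).foldl
    (fun acc v =>
      acc ++ [PySem.Int.band
        ((PySem.List.pyRange 0 8 1).foldl
          (fun v7 _ => if PySem.Int.band v7 128 ≠ 0 then PySem.Int.bxor (v7 <<< 1) 7 else v7 <<< 1)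
          v) 255]) []

-- b[(w ^ v) & 0xFF]: the index is a & 0xFF value, always in [0, 255], and the table has 256
-- entries, so the Python lookup never raises; pyGetD with default 0 is exact here.
def jsc_verify_int (arr : List Int) : Int :=
  arr.foldl (fun w v => PySem.List.pyGetD jsc_code_array (PySem.Int.band (PySem.Int.bxor w v) 255) 0) 0

-- ===== PORT B =====
def jsc_verify_int_alt (arr : List Int) : Int :=
  arr.foldl
    (fun w v =>
      PySem.Int.band
        ((PySem.List.pyRange 0 8 1).foldl
          (fun x _ => if PySem.Int.band x 128 ≠ 0 then PySem.Int.bxor (x <<< 1) 7 else x <<< 1)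
          (PySem.Int.band (PySem.Int.bxor w v) 255)) 255) 0

-- ===== PRECONDITION & SPEC =====
def Spec_jsc_verify_int (arr : List Int) (out : Int) : Prop := out = jsc_verify_int_alt arr
instance (arr : List Int) (out : Int) : Decidable (Spec_jsc_verify_int arr out) := by unfold Spec_jsc_verify_int; infer_instance

-- ===== CLAIM (what is proved, stated in full; the proofs are below) =====
def Claim_equal_jsc_verify_int : Prop := ∀ (arr : List Int), Dom_jsc_verify_int arr → Spec_jsc_verify_int arr (jsc_verify_int arr)

-- ===== LEMMAS AND PROOFS =====

-- a & 255 is a value in [0, 256) for EVERY Int a (Python two's-complement masking).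
theorem band255_bounds (a : Int) : 0 ≤ PySem.Int.band a 255 ∧ PySem.Int.band a 255 < 256 := by
  unfold PySem.Int.band
  split_ifs with h1 h2 h2
  · refine ⟨Int.natCast_nonneg _, ?_⟩
    have := @Nat.and_le_right a.toNat ((255:Int).toNat)
    omega
  · omega
  · refine ⟨Int.natCast_nonneg _, ?_⟩
    have : (255 : Int).toNat - ((255 : Int).toNat &&& (-a - 1).toNat) ≤ (255 : Int).toNat := Nat.sub_le _ _
    omega
  · omega

-- A's table is the map of the 8-round transform over 0..255.
theorem code_array_eq_map : jsc_code_array =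
    (PySem.List.pyRange 0 256 1).map
      (fun v => PySem.Int.band
        ((PySem.List.pyRange 0 8 1).foldl
          (fun v7 _ => if PySem.Int.band v7 128 ≠ 0 then PySem.Int.bxor (v7 <<< 1) 7 else v7 <<< 1)
          v) 255) := by
  unfold jsc_code_array
  rw [PySem.List.foldl_append_singleton_eq_map]
  simp

-- the two per-byte step functions agree on every state and every byte
theorem step_eq (w v : Int) :
    PySem.List.pyGetD jsc_code_array (PySem.Int.band (PySem.Int.bxor w v) 255) 0 =
    PySem.Int.band
      ((PySem.List.pyRange 0 8 1).foldl
        (fun x _ => if PySem.Int.band x 128 ≠ 0 then PySem.Int.bxor (x <<< 1) 7 else x <<< 1)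
        (PySem.Int.band (PySem.Int.bxor w v) 255)) 255 := by
  obtain ⟨h0, h1⟩ := band255_bounds (PySem.Int.bxor w v)
  rw [code_array_eq_map, PySem.List.pyGetD_map_pyRange_of_nonneg _ 256 _ 0 h0 h1]

-- ===== VERDICT (by name: the statement is the Claim_ definition above) =====
theorem jsc_verify_int_spec : Claim_equal_jsc_verify_int := by
  intro arr _
  unfold Spec_jsc_verify_int jsc_verify_int jsc_verify_int_alt
  congr 1
  funext w v
  exact step_eq w v
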